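-- pv_equiv track=rewrite | github.com/Cedian03/advent-of-code | 2024/02.py | part_one_impl
-- ===== SOURCE A (Python) =====
-- def part_one_impl(reports: list[list[int]]) -> int:  # type: ignore
--     res = 0
--
--     for report in reports:
--         d = 0
--
--         for a, b in zip(report, report[1:]):
--             if abs(b - a) > 3:
--                 break
--
--             match d:
--                 case 0:
--                     if b > a:
--                         d = 1
--                     elif b < a:
--                         d = -1
--                     else:
--                         break
--                 case 1:
--                     if b <= a:
--                         break
--                 case -1:
--                     if b >= a:
--                         break
--         else:
--             res += 1
--
--     return res
-- ===== SOURCE B (Python) =====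
-- def part_one_impl(reports: list[list[int]]) -> int:  # type: ignore
--     total = 0
--     for report in reports:
--         diffs = [b - a for a, b in zip(report, report[1:])]
--         if all(1 <= d <= 3 for d in diffs) or all(-3 <= d <= -1 for d in diffs):
--             total += 1
--     return total
-- ===== Notes on version B (the rewrite author's own statement) =====
-- stated objective: simpler
-- what changed: Replaced the direction state variable and the match/break-else state machine with a diff list and two all() predicates (all diffs in 1..3 or all in -3..-1).
import Mathlib
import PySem

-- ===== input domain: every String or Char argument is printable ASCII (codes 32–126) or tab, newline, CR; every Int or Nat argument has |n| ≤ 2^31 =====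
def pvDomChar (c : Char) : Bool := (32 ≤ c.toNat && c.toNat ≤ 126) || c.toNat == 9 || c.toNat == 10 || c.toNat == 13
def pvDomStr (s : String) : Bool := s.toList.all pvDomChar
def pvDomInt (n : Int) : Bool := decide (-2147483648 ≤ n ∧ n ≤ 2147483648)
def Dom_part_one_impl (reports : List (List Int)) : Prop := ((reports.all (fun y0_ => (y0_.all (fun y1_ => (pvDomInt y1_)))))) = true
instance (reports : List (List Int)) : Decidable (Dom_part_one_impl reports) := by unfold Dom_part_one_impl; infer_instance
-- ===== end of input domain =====

-- B replaces A's direction-state/match/break state machine with a diff list and two all() checks; objective: simpler.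

-- ===== PORT A =====
-- inner 'for a,b in zip(report, report[1:]) … else' loop of A, with direction state d;
-- returns true iff the loop finishes without break (report counted safe)
def pvLoopA : List (Int × Int) → Int → Bool
  | [], _ => true
  | (a, b) :: rest, d =>
    if |b - a| > 3 then false
    else if d = 0 then
      if b > a then pvLoopA rest 1
      else if b < a then pvLoopA rest (-1)
      else false
    else if d = 1 then
      if b ≤ a then false else pvLoopA rest 1
    else
      if b ≥ a then false else pvLoopA rest (-1)

def part_one_impl (reports : List (List Int)) : Int :=
  reports.foldl (fun res report =>
    if pvLoopA (report.zip report.tail) 0 then res + 1 else res) 0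

-- ===== PORT B =====
def part_one_impl_alt (reports : List (List Int)) : Int :=
  reports.foldl (fun total report =>
    let diffs := (report.zip report.tail).map (fun p => p.2 - p.1)
    if diffs.all (fun d => 1 ≤ d && d ≤ 3) || diffs.all (fun d => -3 ≤ d && d ≤ -1)
    then total + 1 else total) 0

-- ===== PRECONDITION & SPEC =====
def Spec_part_one_impl (reports : List (List Int)) (out : Int) : Prop := out = part_one_impl_alt reports
instance (reports : List (List Int)) (out : Int) : Decidable (Spec_part_one_impl reports out) := by unfold Spec_part_one_impl; infer_instance

-- ===== CLAIM (what is proved, stated in full; the proofs are below) =====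
def Claim_equal_part_one_impl : Prop := ∀ (reports : List (List Int)), Dom_part_one_impl reports → Spec_part_one_impl reports (part_one_impl reports)

-- ===== LEMMAS AND PROOFS =====

def okUp (p : Int × Int) : Bool := 1 ≤ p.2 - p.1 && p.2 - p.1 ≤ 3
def okDown (p : Int × Int) : Bool := -3 ≤ p.2 - p.1 && p.2 - p.1 ≤ -1

theorem pvLoopA_one (ps : List (Int × Int)) : pvLoopA ps 1 = ps.all okUp := by
  induction ps with
  | nil => rfl
  | cons p rest ih =>
    obtain ⟨a, b⟩ := p
    rcases abs_cases (b - a) with ⟨he, _⟩ | ⟨he, _⟩ <;>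
      simp only [pvLoopA, List.all_cons, he, okUp, ih] <;>
      split_ifs <;> simp_all <;> omega

theorem pvLoopA_neg (ps : List (Int × Int)) : pvLoopA ps (-1) = ps.all okDown := by
  induction ps with
  | nil => rfl
  | cons p rest ih =>
    obtain ⟨a, b⟩ := p
    rcases abs_cases (b - a) with ⟨he, _⟩ | ⟨he, _⟩ <;>
      simp only [pvLoopA, List.all_cons, he, okDown, ih] <;>
      split_ifs <;> simp_all <;> omega

set_option maxHeartbeats 1000000 in
theorem pvLoopA_zero (ps : List (Int × Int)) :
    pvLoopA ps 0 = (ps.all okUp || ps.all okDown) := by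
  cases ps with
  | nil => rfl
  | cons p rest =>
    obtain ⟨a, b⟩ := p
    rcases abs_cases (b - a) with ⟨he, _⟩ | ⟨he, _⟩ <;>
      simp only [pvLoopA, List.all_cons, pvLoopA_one, pvLoopA_neg, he] <;>
      split_ifs <;>
      cases hr1 : rest.all okUp <;> cases hr2 : rest.all okDown <;>
      simp_all [okUp, okDown] <;> omega

theorem safe_eq (report : List Int) :
    pvLoopA (report.zip report.tail) 0 =
      (((report.zip report.tail).map (fun p => p.2 - p.1)).all (fun d => 1 ≤ d && d ≤ 3) ||
       ((report.zip report.tail).map (fun p => p.2 - p.1)).all (fun d => -3 ≤ d && d ≤ -1)) := by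
  rw [pvLoopA_zero, List.all_map, List.all_map]
  have h1 : ((fun d => decide (1 ≤ d) && decide (d ≤ 3)) ∘ fun p : Int × Int => p.2 - p.1) = okUp := by
    funext p; simp [okUp]
  have h2 : ((fun d => decide (-3 ≤ d) && decide (d ≤ -1)) ∘ fun p : Int × Int => p.2 - p.1) = okDown := by
    funext p; simp [okDown]
  rw [h1, h2]

theorem fold_eq (reports : List (List Int)) (acc : Int) :
    reports.foldl (fun res report =>
      if pvLoopA (report.zip report.tail) 0 then res + 1 else res) acc =
    reports.foldl (fun total report =>
      let diffs := (report.zip report.tail).map (fun p => p.2 - p.1)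
      if diffs.all (fun d => 1 ≤ d && d ≤ 3) || diffs.all (fun d => -3 ≤ d && d ≤ -1)
      then total + 1 else total) acc := by
  simp only [safe_eq]

-- ===== VERDICT (by name: the statement is the Claim_ definition above) =====
theorem part_one_impl_spec : Claim_equal_part_one_impl := by
  intro reports _
  unfold Spec_part_one_impl part_one_impl part_one_impl_alt
  exact fold_eq reports 0
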